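-- pv_equiv track=rewrite | github.com/ambiguousphoton/python-projects | baggles/baggles.py | clues
-- ===== SOURCE A (Python) =====
-- def clues(guess, secret_no):
--     if guess == secret_no:
--         return 'you won'
--
--     clues = []
--
--     for i in range(len(guess)):
--         if guess[i] == secret_no[i]:
--             clues.append("fermi")
--         elif guess[i] in secret_no:
--             clues.append("pico")
--     if len(clues) == 0:
--         return 'bagles'
--     else:
--         clues.sort()
--         return ''.join(clues)
-- ===== SOURCE B (Python) =====
-- def clues(guess, secret_no):
--     if guess == secret_no:
--         return 'you won'
--     pairs = list(zip(guess, secret_no))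
--     fermi = sum(1 for g, s in pairs if g == s)
--     pico = sum(1 for g, s in pairs if g != s and g in secret_no)
--     return 'fermi' * fermi + 'pico' * pico or 'bagles'
-- ===== Notes on version B (the rewrite author's own statement) =====
-- stated objective: simpler
-- what changed: Replaces the index loop that appends clue strings to a list and then sorts+joins it with two counts over zip(guess, secret_no) and direct construction 'fermi'*fermi + 'pico'*pico (correct since 'fermi' sorts before 'pico'), with 'or' supplying 'bagles' for the empty result.
import Mathlib
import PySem

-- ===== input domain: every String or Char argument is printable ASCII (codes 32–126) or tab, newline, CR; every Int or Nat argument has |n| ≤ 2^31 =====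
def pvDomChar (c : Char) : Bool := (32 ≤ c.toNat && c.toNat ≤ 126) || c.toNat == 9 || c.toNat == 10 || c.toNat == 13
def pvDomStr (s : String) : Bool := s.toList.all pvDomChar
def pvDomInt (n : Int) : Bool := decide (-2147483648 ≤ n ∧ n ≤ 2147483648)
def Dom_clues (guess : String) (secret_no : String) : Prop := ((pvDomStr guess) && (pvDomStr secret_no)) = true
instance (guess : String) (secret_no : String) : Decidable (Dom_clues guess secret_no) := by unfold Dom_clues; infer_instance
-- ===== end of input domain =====

-- B replaces A's append-to-list-then-sort-and-join loop by counting fermi/pico over zip(guess, secret_no)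
-- and building 'fermi'*fermi + 'pico'*pico directly (objective: simpler).

-- ===== PORT A =====
-- the body of A's for-loop (named so the proofs can refer to it)
def cluesLoopBody (guess : String) (secret_no : String) (acc : List String) (i : Int) : List String :=
  match PySem.Str.pyGet? guess i, PySem.Str.pyGet? secret_no i with
  | some gc, some sc =>
      if gc == sc then acc ++ ["fermi"]
      else if PySem.Chars.isIn [gc] secret_no.toList then acc ++ ["pico"]
      else acc
  | _, _ => acc   -- unreachable inside Pre_ (Python raises IndexError there)

def clues (guess : String) (secret_no : String) : String :=
  if guess == secret_no then "you won"
  else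
    let cs : List String :=
      (PySem.List.pyRange 0 (PySem.Str.len guess) 1).foldl (cluesLoopBody guess secret_no) []
    if cs.length == 0 then "bagles"
    else PySem.Str.join "" (PySem.List.sorted cs (fun x => x) false)

-- ===== PORT B =====
def clues_alt (guess : String) (secret_no : String) : String :=
  if guess == secret_no then "you won"
  else
    let pairs := guess.toList.zip secret_no.toList
    let fermi := (pairs.filter (fun p => p.1 == p.2)).length
    let pico := (pairs.filter (fun p => p.1 != p.2 && PySem.Chars.isIn [p.1] secret_no.toList)).length
    let res : List Char := PySem.List.pyRepeat "fermi".toList (fermi : Int) ++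
                           PySem.List.pyRepeat "pico".toList (pico : Int)
    if res.isEmpty then "bagles" else String.ofList res

-- ===== PRECONDITION & SPEC =====
-- Pre_ excludes exactly the inputs where A raises IndexError: guess longer than secret_no (and not equal).
def Pre_clues (guess : String) (secret_no : String) : Prop :=
  guess = secret_no ∨ guess.toList.length ≤ secret_no.toList.length
instance (guess : String) (secret_no : String) : Decidable (Pre_clues guess secret_no) := by
  unfold Pre_clues; infer_instance
def pvWitness_clues : String × String := ("12", "13")

def Spec_clues (guess : String) (secret_no : String) (out : String) : Prop := out = clues_alt guess secret_no
instance (guess : String) (secret_no : String) (out : String) : Decidable (Spec_clues guess secret_no out) := by unfold Spec_clues; infer_instance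

-- ===== CLAIM (what is proved, stated in full; the proofs are below) =====
def Claim_equal_clues : Prop := ∀ (guess : String) (secret_no : String), Dom_clues guess secret_no → Pre_clues guess secret_no → Spec_clues guess secret_no (clues guess secret_no)

-- ===== LEMMAS AND PROOFS =====

-- the per-pair clue contribution (the body of A's loop, seen from the zipped pairs)
def pvClue (sec : List Char) (p : Char × Char) : List String :=
  if p.1 == p.2 then ["fermi"]
  else if PySem.Chars.isIn [p.1] sec then ["pico"]
  else []

-- the same contribution read off by index
def pvIdxClue (g : List Char) (s : List Char) (sec : List Char) (i : Nat) : List String :=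
  match g[i]?, s[i]? with
  | some a, some b => pvClue sec (a, b)
  | _, _ => []

lemma pv_flatMap_range (sec : List Char) :
    ∀ (g s : List Char), g.length ≤ s.length →
      (List.range g.length).flatMap (pvIdxClue g s sec) = (g.zip s).flatMap (pvClue sec) := by
  intro g
  induction g with
  | nil => intro s _; simp
  | cons a g' ih =>
    intro s hlen
    cases s with
    | nil => simp at hlen
    | cons b s' =>
      simp only [List.length_cons, List.range_succ_eq_map, List.flatMap_cons, List.flatMap_map,
        List.zip_cons_cons]
      have h0 : pvIdxClue (a :: g') (b :: s') sec 0 = pvClue sec (a, b) := by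
        simp [pvIdxClue]
      have hs : ∀ i : Nat, pvIdxClue (a :: g') (b :: s') sec (i + 1) = pvIdxClue g' s' sec i := by
        intro i; simp [pvIdxClue]
      rw [h0]
      refine congrArg _ ?_
      calc (List.range g'.length).flatMap (fun i => pvIdxClue (a :: g') (b :: s') sec (i + 1))
          = (List.range g'.length).flatMap (pvIdxClue g' s' sec) := by
            exact List.flatMap_congr (fun i _ => hs i)
        _ = (g'.zip s').flatMap (pvClue sec) := ih s' (by simpa using hlen)

lemma pv_perm (sec : List Char) (L : List (Char × Char)) :
    (L.flatMap (pvClue sec)).Perm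
      (List.replicate (L.countP (fun p => p.1 == p.2)) "fermi" ++
       List.replicate (L.countP (fun p => p.1 != p.2 && PySem.Chars.isIn [p.1] sec)) "pico") := by
  induction L with
  | nil => simp
  | cons p L ih =>
    by_cases h1 : p.1 = p.2
    · simp only [List.flatMap_cons, List.countP_cons, pvClue, h1]
      simp only [BEq.rfl, if_true, bne_self_eq_false, Bool.false_and, List.replicate_succ,
        List.cons_append]
      exact ih.cons "fermi"
    · have hne : (p.1 == p.2) = false := by simp [h1]
      by_cases h2 : PySem.Chars.isIn [p.1] sec = true
      · simp only [List.flatMap_cons, List.countP_cons, pvClue, hne, h2, bne, Bool.not_false,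
          Bool.true_and, if_true]
        simp only [Bool.false_eq_true, if_false, List.replicate_succ]
        exact (ih.cons "pico").trans (List.perm_middle.symm)
      · have h2' : PySem.Chars.isIn [p.1] sec = false := by simpa using h2
        simp only [List.flatMap_cons, List.countP_cons, pvClue, hne, h2', bne, Bool.not_false,
          Bool.and_false]
        simpa using ih

lemma pv_join_nil_flatten (l : List (List Char)) : PySem.Chars.join [] l = l.flatten := by
  induction l with
  | nil => rfl
  | cons a l ih =>
    cases l with
    | nil => simp [PySem.Chars.join_singleton]
    | cons b t => rw [PySem.Chars.join_cons_cons, ih]; simp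

lemma pv_fermi_le_pico : ("fermi" : String) ≤ "pico" := by
  apply le_of_lt
  rw [String.lt_iff_toList_lt]
  decide

lemma pv_pyRepeat (xs : List Char) (n : Nat) :
    PySem.List.pyRepeat xs (n : Int) = (List.replicate n xs).flatten := by
  rfl

lemma pv_cs_eq (guess : String) (secret_no : String)
    (hlen : guess.toList.length ≤ secret_no.toList.length) :
    (PySem.List.pyRange 0 (PySem.Str.len guess) 1).foldl (cluesLoopBody guess secret_no) []
      = (guess.toList.zip secret_no.toList).flatMap (pvClue secret_no.toList) := by
  rw [PySem.Str.len_eq, PySem.List.pyRange_zero_natCast, List.foldl_map]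
  have hbody : ∀ (acc : List String) (k : Nat), k ∈ List.range guess.toList.length →
      cluesLoopBody guess secret_no acc (k : Int)
        = acc ++ pvIdxClue guess.toList secret_no.toList secret_no.toList k := by
    intro acc k _
    unfold cluesLoopBody pvIdxClue
    simp only [PySem.Str.pyGet?_natCast]
    rcases guess.toList[k]? with _ | gc <;> rcases secret_no.toList[k]? with _ | sc
    · simp
    · simp
    · simp
    · simp only [pvClue]
      split_ifs <;> simp
  calc List.foldl (fun acc (k : Nat) => cluesLoopBody guess secret_no acc (k : Int)) []
          (List.range guess.toList.length)
      = List.foldl (fun acc k => acc ++ pvIdxClue guess.toList secret_no.toList secret_no.toList k) []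
          (List.range guess.toList.length) := PySem.List.foldl_congr_mem _ _ _ _ hbody
    _ = [] ++ (List.range guess.toList.length).flatMap (pvIdxClue guess.toList secret_no.toList secret_no.toList) :=
          PySem.List.foldl_append_eq_flatMap _ _ _
    _ = (guess.toList.zip secret_no.toList).flatMap (pvClue secret_no.toList) := by
          rw [List.nil_append]
          exact pv_flatMap_range secret_no.toList guess.toList secret_no.toList hlen

lemma pv_final (sec : List Char) (L : List (Char × Char)) :
    (if (L.flatMap (pvClue sec)).length == 0 then "bagles"
     else PySem.Str.join "" (PySem.List.sorted (L.flatMap (pvClue sec)) (fun x => x) false))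
    = (if (PySem.List.pyRepeat "fermi".toList ((L.countP (fun p => p.1 == p.2) : Nat) : Int) ++
           PySem.List.pyRepeat "pico".toList ((L.countP (fun p => p.1 != p.2 && PySem.Chars.isIn [p.1] sec) : Nat) : Int)).isEmpty then "bagles"
       else String.ofList (PySem.List.pyRepeat "fermi".toList ((L.countP (fun p => p.1 == p.2) : Nat) : Int) ++
           PySem.List.pyRepeat "pico".toList ((L.countP (fun p => p.1 != p.2 && PySem.Chars.isIn [p.1] sec) : Nat) : Int))) := by
  have hperm := pv_perm sec L
  generalize ha : L.countP (fun p => p.1 == p.2) = a at hperm ⊢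
  generalize hb : L.countP (fun p => p.1 != p.2 && PySem.Chars.isIn [p.1] sec) = b at hperm ⊢
  have hlencs : (L.flatMap (pvClue sec)).length = a + b := by
    rw [hperm.length_eq]; simp
  rw [pv_pyRepeat, pv_pyRepeat]
  by_cases hz : a = 0 ∧ b = 0
  · rcases hz with ⟨hza, hzb⟩
    subst hza; subst hzb
    simp [hlencs]
  · have hcsne : ((L.flatMap (pvClue sec)).length == 0) = false := by
      simp only [beq_eq_false_iff_ne, ne_eq, hlencs]; omega
    have hresne : ((List.replicate a "fermi".toList).flatten ++ (List.replicate b "pico".toList).flatten).isEmpty = false := by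
      simp only [List.isEmpty_eq_false_iff, ne_eq, ← List.length_eq_zero_iff]
      simp only [List.length_append, List.length_flatten, List.map_replicate, List.sum_replicate]
      simp only [String.toList] 
      simp
      omega
    rw [hcsne, hresne]
    simp only [Bool.false_eq_true, if_false]
    have hsorted : PySem.List.sorted (L.flatMap (pvClue sec)) (fun x => x) false
        = List.replicate a "fermi" ++ List.replicate b "pico" := by
      apply PySem.List.sorted_id_eq_of_perm_of_pairwise _ _ hperm.symm
      apply List.pairwise_append.mpr
      refine ⟨?_, ?_, ?_⟩
      · exact List.pairwise_replicate.mpr (Or.inr le_rfl)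
      · exact List.pairwise_replicate.mpr (Or.inr le_rfl)
      · intro x hx y hy
        rw [List.eq_of_mem_replicate hx, List.eq_of_mem_replicate hy]
        exact pv_fermi_le_pico
    rw [hsorted]
    have hJ : (PySem.Str.join "" (List.replicate a "fermi" ++ List.replicate b "pico")).toList
        = (List.replicate a "fermi".toList).flatten ++ (List.replicate b "pico".toList).flatten := by
      rw [PySem.Str.toList_join]
      rw [show ("" : String).toList = [] from rfl, pv_join_nil_flatten]
      simp
    calc PySem.Str.join "" (List.replicate a "fermi" ++ List.replicate b "pico")
        = String.ofList ((PySem.Str.join "" (List.replicate a "fermi" ++ List.replicate b "pico")).toList) :=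
          (String.ofList_toList).symm
      _ = String.ofList ((List.replicate a "fermi".toList).flatten ++ (List.replicate b "pico".toList).flatten) := by
          rw [hJ]

-- ===== VERDICT (by name: the statement is the Claim_ definition above) =====
theorem clues_spec : Claim_equal_clues := by
  intro guess secret_no _ hpre
  unfold Spec_clues
  by_cases heq : guess = secret_no
  · simp [clues, clues_alt, heq]
  · have hbeq : (guess == secret_no) = false := by simp [heq]
    have hlen : guess.toList.length ≤ secret_no.toList.length := hpre.resolve_left heq
    simp only [clues, clues_alt, hbeq, Bool.false_eq_true, if_false]
    rw [pv_cs_eq guess secret_no hlen,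
        ← List.countP_eq_length_filter, ← List.countP_eq_length_filter]
    exact pv_final secret_no.toList (guess.toList.zip secret_no.toList)
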